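-- pv_equiv track=rewrite | github.com/ShreyanshTripathy/Stochastic_Modelling_of_lifts | Combined Lift System/single_file_simulation.py | data_sorter
-- ===== SOURCE A (Python) =====
-- def data_sorter(passenger_data, lift_position):
--     grouped = {}
--     for item in passenger_data:
--         key = item[3]  # Arrival time field
--         grouped.setdefault(key, []).append(item)
--     sorted_data = []
--     for group in grouped.values():
--         sorted_group = sorted(group, key=lambda x: abs(x[1] - lift_position))
--         sorted_data.extend(sorted_group)
--     return sorted_data
-- ===== SOURCE B (Python) =====
-- def data_sorter(passenger_data, lift_position):
--     first_seen = list(dict.fromkeys(item[3] for item in passenger_data))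
--     return sorted(passenger_data,
--                   key=lambda x: (first_seen.index(x[3]), abs(x[1] - lift_position)))
-- ===== Notes on version B (the rewrite author's own statement) =====
-- stated objective: simpler
-- what changed: Replaces A's dict-of-lists grouping plus per-bucket sort and concatenation by two plain passes: an ordered-dedup list of arrival times, then one stable global sort on the composite key (first-appearance position of the arrival time, distance to the lift).
import Mathlib
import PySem

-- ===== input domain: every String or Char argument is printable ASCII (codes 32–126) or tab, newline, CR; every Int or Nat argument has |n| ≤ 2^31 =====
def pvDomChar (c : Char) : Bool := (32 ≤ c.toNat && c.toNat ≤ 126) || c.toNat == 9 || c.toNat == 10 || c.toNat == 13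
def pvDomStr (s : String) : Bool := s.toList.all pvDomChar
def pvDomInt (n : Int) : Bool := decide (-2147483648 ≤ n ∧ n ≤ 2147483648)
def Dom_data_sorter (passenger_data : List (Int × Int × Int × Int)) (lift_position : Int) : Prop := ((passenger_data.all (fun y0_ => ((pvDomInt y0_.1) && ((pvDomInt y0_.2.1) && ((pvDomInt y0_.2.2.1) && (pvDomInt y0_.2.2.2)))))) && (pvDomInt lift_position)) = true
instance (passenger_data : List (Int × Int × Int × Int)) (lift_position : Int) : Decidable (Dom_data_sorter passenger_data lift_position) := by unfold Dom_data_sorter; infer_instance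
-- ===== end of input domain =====

-- B replaces A's dict-of-lists grouping + per-bucket sort + concatenation by two plain
-- passes — an ordered-dedup list of arrival times, then ONE stable global sort on the
-- composite key (first-appearance position, distance) — same return value, simpler shape.

-- ===== PORT A =====
-- grouped.setdefault(key, []).append(item)  ≡  modify key [] (· ++ [item])  (in-place append, key keeps/gains its position)
def data_sorter (passenger_data : List (Int × Int × Int × Int)) (lift_position : Int) : List (Int × Int × Int × Int) :=
  (PySem.Dict.values
      (passenger_data.foldl (fun d item => d.modify item.2.2.2 [] (fun g => g ++ [item]))
        (PySem.Dict.empty : PySem.Dict Int (List (Int × Int × Int × Int))))).foldl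
    (fun acc group => acc ++ PySem.List.sorted group (fun x => (x.2.1 - lift_position).natAbs) false) []

-- ===== PORT B =====
-- list(dict.fromkeys(…)) is PySem.List.dedup; first_seen.index(x[3]) always succeeds
-- (x[3] comes from the list first_seen was built over), ported as index? …|>.getD 0, exact here
def data_sorter_alt (passenger_data : List (Int × Int × Int × Int)) (lift_position : Int) : List (Int × Int × Int × Int) :=
  let first_seen := PySem.List.dedup (passenger_data.map (fun item => item.2.2.2))
  PySem.List.sorted2 passenger_data
    (fun x => (((PySem.List.index? first_seen x.2.2.2).getD 0 : Nat) : Int))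
    (fun x => (x.2.1 - lift_position).natAbs) false

-- ===== PRECONDITION & SPEC =====
def Spec_data_sorter (passenger_data : List (Int × Int × Int × Int)) (lift_position : Int) (out : List (Int × Int × Int × Int)) : Prop := out = data_sorter_alt passenger_data lift_position
instance (passenger_data : List (Int × Int × Int × Int)) (lift_position : Int) (out : List (Int × Int × Int × Int)) : Decidable (Spec_data_sorter passenger_data lift_position out) := by unfold Spec_data_sorter; infer_instance

-- ===== CLAIM (what is proved, stated in full; the proofs are below) =====
def Claim_equal_data_sorter : Prop := ∀ (passenger_data : List (Int × Int × Int × Int)) (lift_position : Int), Dom_data_sorter passenger_data lift_position → Spec_data_sorter passenger_data lift_position (data_sorter passenger_data lift_position)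

-- ===== LEMMAS AND PROOFS =====

-- abbreviations used only by proofs
def pvKf (x : Int × Int × Int × Int) : Int := x.2.2.2
def pvDf (L : Int) (x : Int × Int × Int × Int) : Nat := (x.2.1 - L).natAbs
def pvFib (pd : List (Int × Int × Int × Int)) (κ : Int) : List (Int × Int × Int × Int) :=
  pd.filter (fun x => pvKf x == κ)
def pvFK (pd : List (Int × Int × Int × Int)) : List Int := PySem.Set.ofList (pd.map pvKf)
def pvSortd (L : Int) (g : List (Int × Int × Int × Int)) : List (Int × Int × Int × Int) :=
  PySem.List.sorted g (pvDf L) false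
def pvAres (L : Int) (pd : List (Int × Int × Int × Int)) : List (Int × Int × Int × Int) :=
  (pvFK pd).flatMap (fun κ => pvSortd L (pvFib pd κ))

lemma insertBy_nil {α : Type} (before : α → α → Bool) (x : α) :
    PySem.List.insertBy before x [] = [x] := rfl

lemma insertBy_cons {α : Type} (before : α → α → Bool) (x y : α) (ys : List α) :
    PySem.List.insertBy before x (y :: ys) =
      if before x y then x :: y :: ys else y :: PySem.List.insertBy before x ys := rfl

-- insert skips a prefix it does not go before
lemma insertBy_append_left {α : Type} (before : α → α → Bool) (x : α) (l1 l2 : List α)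
    (h : ∀ y ∈ l1, before x y = false) :
    PySem.List.insertBy before x (l1 ++ l2) = l1 ++ PySem.List.insertBy before x l2 := by
  induction l1 with
  | nil => simp
  | cons a l ih =>
    simp [List.cons_append, insertBy_cons, h a (by simp),
      ih (fun y hy => h y (by simp [hy]))]

-- insert lands before a suffix it goes before everywhere
lemma insertBy_append_right {α : Type} (before : α → α → Bool) (x : α) (l1 l2 : List α)
    (h : ∀ y ∈ l2, before x y = true) :
    PySem.List.insertBy before x (l1 ++ l2) = PySem.List.insertBy before x l1 ++ l2 := by
  induction l1 with
  | nil =>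
    cases l2 with
    | nil => simp
    | cons b bs => simp [insertBy_nil, insertBy_cons, h b (by simp)]
  | cons a l ih =>
    by_cases hab : before x a
    · simp [insertBy_cons, hab]
    · simp only [List.cons_append, insertBy_cons, hab]; simp [ih]

lemma insertBy_congr {α : Type} (before before' : α → α → Bool) (x : α) (l : List α)
    (h : ∀ y ∈ l, before x y = before' x y) :
    PySem.List.insertBy before x l = PySem.List.insertBy before' x l := by
  induction l with
  | nil => rfl
  | cons a l ih =>
    rw [insertBy_cons, insertBy_cons, h a (by simp),
      ih (fun y hy => h y (by simp [hy]))]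

lemma pvFK_append (p r : List (Int × Int × Int × Int)) :
    pvFK (p ++ r) = PySem.Set.update (pvFK p) (r.map pvKf) := by
  simp [pvFK, PySem.Set.ofList_append]

lemma pvFK_nodup (pd : List (Int × Int × Int × Int)) : (pvFK pd).Nodup :=
  PySem.Set.nodup_ofList _

lemma pvFK_idxOf_prefix (p r : List (Int × Int × Int × Int)) (κ : Int) (hκ : κ ∈ pvFK p) :
    (pvFK (p ++ r)).idxOf κ = (pvFK p).idxOf κ := by
  rw [pvFK_append, PySem.Set.update_eq_append_filter, List.idxOf_append, if_pos hκ]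

lemma mem_pvFK {pd : List (Int × Int × Int × Int)} {κ : Int} :
    κ ∈ pvFK pd ↔ ∃ x ∈ pd, pvKf x = κ := by
  simp [pvFK, PySem.Set.mem_ofList]

lemma pvFib_append_singleton (q : List (Int × Int × Int × Int)) (x : Int × Int × Int × Int) (κ : Int) :
    pvFib (q ++ [x]) κ = pvFib q κ ++ if pvKf x == κ then [x] else [] := by
  simp [pvFib, pvKf, List.filter_append, List.filter_cons]

lemma pvFib_same (q : List (Int × Int × Int × Int)) (x : Int × Int × Int × Int) (κ : Int)
    (h : pvKf x ≠ κ) : pvFib (q ++ [x]) κ = pvFib q κ := by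
  rw [pvFib_append_singleton]; simp [h]

lemma pvSortd_append_singleton (L : Int) (g : List (Int × Int × Int × Int)) (x : Int × Int × Int × Int) :
    pvSortd L (g ++ [x]) =
      PySem.List.insertBy (fun a b => decide (pvDf L a < pvDf L b)) x (pvSortd L g) := by
  simp [pvSortd, PySem.List.sorted, List.foldl_append]

lemma mem_pvSortd {L : Int} {g : List (Int × Int × Int × Int)} {y : Int × Int × Int × Int} :
    y ∈ pvSortd L g ↔ y ∈ g := PySem.List.mem_sorted _ _ _ _

-- key facts about positions of keys in a nodup decomposition
lemma idxOf_middle {ks1 ks2 : List Int} {a : Int} (hnd : (ks1 ++ a :: ks2).Nodup) :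
    (ks1 ++ a :: ks2).idxOf a = ks1.length := by
  have ha : a ∉ ks1 := by
    intro h; exact (List.disjoint_of_nodup_append hnd) h (by simp)
  rw [List.idxOf_append, if_neg ha, List.idxOf_cons_self]
  omega

lemma idxOf_left_lt {ks1 ks2 : List Int} {a κ : Int} (hnd : (ks1 ++ a :: ks2).Nodup)
    (hκ : κ ∈ ks1) : (ks1 ++ a :: ks2).idxOf κ < (ks1 ++ a :: ks2).idxOf a := by
  rw [idxOf_middle hnd, List.idxOf_append, if_pos hκ]
  exact List.idxOf_lt_length_iff.mpr hκ

lemma idxOf_right_gt {ks1 ks2 : List Int} {a κ : Int} (hnd : (ks1 ++ a :: ks2).Nodup)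
    (hκ : κ ∈ ks2) : (ks1 ++ a :: ks2).idxOf a < (ks1 ++ a :: ks2).idxOf κ := by
  have hκ1 : κ ∉ ks1 := by
    intro h; exact (List.disjoint_of_nodup_append hnd) h (by simp [hκ])
  have hnd2 := (List.nodup_append.mp hnd).2.1
  have hκa : a ≠ κ := by rintro rfl; exact (List.nodup_cons.mp hnd2).1 hκ
  rw [idxOf_middle hnd, List.idxOf_append, if_neg hκ1, List.idxOf_cons_ne _ hκa]
  omega

-- the canonical "before" relation used by the main invariant
def pvBef (L : Int) (XS : List (Int × Int × Int × Int)) (x y : Int × Int × Int × Int) : Bool :=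
  decide ((pvFK XS).idxOf (pvKf x) < (pvFK XS).idxOf (pvKf y)) ||
    (!decide ((pvFK XS).idxOf (pvKf y) < (pvFK XS).idxOf (pvKf x)) && decide (pvDf L x < pvDf L y))

-- MAIN INVARIANT: a stable insertion sort by (first-appearance index of key, distance) over a
-- prefix p of XS equals the concatenation, key by key in first-appearance order, of the
-- distance-sorted fibers of p.
lemma pv_main (L : Int) (XS : List (Int × Int × Int × Int))
    (before : (Int × Int × Int × Int) → (Int × Int × Int × Int) → Bool)
    (hb : ∀ x y, x ∈ XS → y ∈ XS → before x y = pvBef L XS x y) :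
    ∀ p t, XS = p ++ t →
      p.foldl (fun acc x => PySem.List.insertBy before x acc) [] = pvAres L p := by
  intro p
  induction p using List.reverseRecOn with
  | nil => intro t _; simp [pvAres, pvFK, PySem.Set.ofList]
  | append_singleton q x ih =>
    intro t hXS
    have hXS' : XS = q ++ (x :: t) := by simpa using hXS
    have ihq := ih (x :: t) hXS'
    have hxXS : x ∈ XS := by rw [hXS']; simp
    have hqXS : ∀ y ∈ q, y ∈ XS := fun y hy => by rw [hXS']; simp [hy]
    have hfibmem : ∀ κ, ∀ y ∈ pvSortd L (pvFib q κ), y ∈ q ∧ pvKf y = κ := by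
      intro κ y hy
      have := mem_pvSortd.mp hy
      have h2 := List.of_mem_filter this
      exact ⟨List.mem_of_mem_filter this, by simpa using h2⟩
    have hidx : ∀ κ ∈ pvFK q, (pvFK XS).idxOf κ = (pvFK q).idxOf κ := by
      intro κ hκ; rw [hXS']; exact pvFK_idxOf_prefix _ _ _ hκ
    rw [List.foldl_append, List.foldl_cons, List.foldl_nil, ihq]
    by_cases hmem : pvKf x ∈ pvFK q
    · -- existing key: insert inside its block
      obtain ⟨ks1, ks2, hdecomp⟩ := List.append_of_mem hmem
      have hnd : (ks1 ++ pvKf x :: ks2).Nodup := hdecomp ▸ pvFK_nodup q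
      have hFKeq : pvFK (q ++ [x]) = pvFK q := by
        simp only [pvFK, List.map_append, List.map_cons, List.map_nil,
          PySem.Set.ofList_append_singleton]
        exact PySem.Set.add_of_mem hmem
      -- membership-in-fK facts for block keys
      have hks1 : ∀ κ ∈ ks1, κ ∈ pvFK q := fun κ hκ => hdecomp ▸ (by simp [hκ])
      have hks2 : ∀ κ ∈ ks2, κ ∈ pvFK q := fun κ hκ => hdecomp ▸ (by simp [hκ])
      -- step 1: split off the ks2 blocks (x goes before all of them)
      have h2 : ∀ y ∈ (ks2.flatMap fun κ => pvSortd L (pvFib q κ)), before x y = true := by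
        intro y hy
        obtain ⟨κ, hκ, hy'⟩ := List.mem_flatMap.mp hy
        obtain ⟨hyq, hyk⟩ := hfibmem κ y hy'
        have hlt : (pvFK XS).idxOf (pvKf x) < (pvFK XS).idxOf (pvKf y) := by
          rw [hyk, hidx _ hmem, hidx _ (hks2 _ hκ), hdecomp]
          exact idxOf_right_gt hnd hκ
        rw [hb x y hxXS (hqXS y hyq)]
        simp [pvBef, hlt]
      have h1 : ∀ y ∈ (ks1.flatMap fun κ => pvSortd L (pvFib q κ)), before x y = false := by
        intro y hy
        obtain ⟨κ, hκ, hy'⟩ := List.mem_flatMap.mp hy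
        obtain ⟨hyq, hyk⟩ := hfibmem κ y hy'
        have hlt : (pvFK XS).idxOf (pvKf y) < (pvFK XS).idxOf (pvKf x) := by
          rw [hyk, hidx _ hmem, hidx _ (hks1 _ hκ), hdecomp]
          exact idxOf_left_lt hnd hκ
        rw [hb x y hxXS (hqXS y hyq)]
        simp [pvBef, hlt, Nat.lt_asymm hlt]
      have hblk : ∀ y ∈ pvSortd L (pvFib q (pvKf x)),
          before x y = decide (pvDf L x < pvDf L y) := by
        intro y hy
        obtain ⟨hyq, hyk⟩ := hfibmem (pvKf x) y hy
        rw [hb x y hxXS (hqXS y hyq)]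
        simp [pvBef, hyk]
      calc
        PySem.List.insertBy before x (pvAres L q)
            = PySem.List.insertBy before x
                ((ks1.flatMap fun κ => pvSortd L (pvFib q κ)) ++
                  (pvSortd L (pvFib q (pvKf x)) ++
                    (ks2.flatMap fun κ => pvSortd L (pvFib q κ)))) := by
              rw [pvAres, hdecomp]; simp [List.flatMap_append]
        _ = (ks1.flatMap fun κ => pvSortd L (pvFib q κ)) ++
              (PySem.List.insertBy before x (pvSortd L (pvFib q (pvKf x))) ++
                (ks2.flatMap fun κ => pvSortd L (pvFib q κ))) := by
              rw [insertBy_append_left _ _ _ _ h1, insertBy_append_right _ _ _ _ h2]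
        _ = (ks1.flatMap fun κ => pvSortd L (pvFib q κ)) ++
              (pvSortd L (pvFib (q ++ [x]) (pvKf x)) ++
                (ks2.flatMap fun κ => pvSortd L (pvFib q κ))) := by
              rw [insertBy_congr before (fun a b => decide (pvDf L a < pvDf L b)) x _ hblk,
                ← pvSortd_append_singleton, pvFib_append_singleton]
              simp
        _ = pvAres L (q ++ [x]) := by
              have hdisj := List.disjoint_of_nodup_append hnd
              have hnd2 := (List.nodup_append.mp hnd).2.1
              simp only [pvAres, hFKeq, hdecomp, List.flatMap_append, List.flatMap_cons]
              congr 1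
              · exact List.flatMap_congr fun κ hκ =>
                  congrArg (pvSortd L)
                    (pvFib_same q x κ (by rintro rfl; exact hdisj hκ (by simp))).symm
              congr 1
              exact List.flatMap_congr fun κ hκ =>
                congrArg (pvSortd L)
                  (pvFib_same q x κ (by rintro rfl; exact (List.nodup_cons.mp hnd2).1 hκ)).symm
    · -- fresh key: x goes after everything, its block is new at the end
      have hall : ∀ y ∈ pvAres L q, before x y = false := by
        intro y hy
        obtain ⟨κ, hκ, hy'⟩ := List.mem_flatMap.mp hy
        obtain ⟨hyq, hyk⟩ := hfibmem κ y hy'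
        have hky : (pvFK q).idxOf κ < (pvFK q).length := List.idxOf_lt_length_iff.mpr hκ
        have hxpos : (pvFK XS).idxOf (pvKf x) ≥ (pvFK q).length := by
          rw [hXS', pvFK_append, PySem.Set.update_eq_append_filter, List.idxOf_append,
            if_neg hmem]
          omega
        have hlt : (pvFK XS).idxOf (pvKf y) < (pvFK XS).idxOf (pvKf x) := by
          rw [hyk, hidx _ hκ]; omega
        rw [hb x y hxXS (hqXS y hyq)]
        simp [pvBef, hlt, Nat.lt_asymm hlt]
      rw [PySem.List.insertBy_of_forall_not_before _ _ _ hall]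
      have hFKeq : pvFK (q ++ [x]) = pvFK q ++ [pvKf x] := by
        simp only [pvFK, List.map_append, List.map_cons, List.map_nil,
          PySem.Set.ofList_append_singleton]
        exact PySem.Set.add_of_not_mem hmem
      have hfibx : pvFib q (pvKf x) = [] := by
        simp only [pvFib, List.filter_eq_nil_iff, beq_iff_eq]
        intro y hy hkeq
        exact hmem (mem_pvFK.mpr ⟨y, hy, hkeq⟩)
      have hx1 : pvFib (q ++ [x]) (pvKf x) = [x] := by
        rw [pvFib_append_singleton, hfibx]; simp
      have hx2 : pvSortd L [x] = [x] := rfl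
      simp only [pvAres, hFKeq, List.flatMap_append, List.flatMap_cons, List.flatMap_nil,
        List.append_nil, hx1, hx2]
      congr 1
      exact List.flatMap_congr fun κ hκ =>
        congrArg (pvSortd L) (pvFib_same q x κ (by rintro rfl; exact hmem hκ)).symm

-- characterisation of A's grouped dict and result
lemma grouped_keys (pd : List (Int × Int × Int × Int)) :
    (pd.foldl (fun d item => d.modify item.2.2.2 [] (fun g => g ++ [item]))
      (PySem.Dict.empty : PySem.Dict Int (List (Int × Int × Int × Int)))).keys = pvFK pd := by
  have := PySem.Dict.keys_foldl_modify_key pd (fun x => pvKf x) []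
    (fun _ x => (fun g => g ++ [x]))
    (PySem.Dict.empty : PySem.Dict Int (List (Int × Int × Int × Int)))
  simpa [pvKf, PySem.Dict.keys_empty, PySem.Set.update_nil_left, pvFK] using this

lemma grouped_getD (pd : List (Int × Int × Int × Int)) (κ : Int) :
    (pd.foldl (fun d item => d.modify item.2.2.2 [] (fun g => g ++ [item]))
      (PySem.Dict.empty : PySem.Dict Int (List (Int × Int × Int × Int)))).getD κ [] = pvFib pd κ := by
  have h := PySem.Dict.getD_foldl_modify_append (pd.map (fun x => (pvKf x, x)))
    (PySem.Dict.empty : PySem.Dict Int (List (Int × Int × Int × Int))) κ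
  rw [List.foldl_map] at h
  simpa [pvKf, pvFib, PySem.Dict.getD_empty, List.filter_map, Function.comp_def] using h

lemma portA_eq (pd : List (Int × Int × Int × Int)) (L : Int) :
    data_sorter pd L = pvAres L pd := by
  unfold data_sorter
  have hnd : (pd.foldl (fun d item => d.modify item.2.2.2 [] (fun g => g ++ [item]))
      (PySem.Dict.empty : PySem.Dict Int (List (Int × Int × Int × Int)))).keys.Nodup := by
    rw [grouped_keys]; exact pvFK_nodup pd
  rw [PySem.Dict.values_eq_map_keys _ hnd [], grouped_keys]
  rw [List.foldl_map, PySem.List.foldl_append_eq_flatMap]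
  simp only [List.nil_append, pvAres]
  apply List.flatMap_congr
  intro κ hκ
  rw [grouped_getD]
  rfl

-- .index on a list containing v returns v's first-occurrence index
lemma idxOf?_getD_of_mem {α : Type} [DecidableEq α] (xs : List α) (v : α) (h : v ∈ xs) :
    (xs.idxOf? v).getD 0 = xs.idxOf v := by
  induction xs with
  | nil => cases h
  | cons a t ih =>
    by_cases hva : v = a
    · subst hva; simp [List.idxOf?_cons, List.idxOf_cons]
    · have hvt : v ∈ t := by rcases List.mem_cons.mp h with h' | h' <;> [exact absurd h' hva; exact h']
      have hne : ¬ (a == v) := by simp [hva]; exact fun h' => hva h'.symm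
      have hsome : (t.idxOf? v).isSome := List.isSome_idxOf?.mpr hvt
      obtain ⟨k, hk⟩ := Option.isSome_iff_exists.mp hsome
      simp [List.idxOf?_cons, List.idxOf_cons, hne, hk, ← ih hvt, hk]

lemma portB_eq (pd : List (Int × Int × Int × Int)) (L : Int) :
    data_sorter_alt pd L = pvAres L pd := by
  unfold data_sorter_alt
  show List.foldl _ [] pd = _
  apply pv_main L pd _ _ pd [] (by simp)
  intro x y hx hy
  have hfs : PySem.List.dedup (pd.map (fun item => item.2.2.2)) = pvFK pd := by
    simp only [PySem.List.dedup_eq_ofList]; rfl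
  have hix : ∀ z : Int × Int × Int × Int, z ∈ pd →
      ((PySem.List.index? (PySem.List.dedup (pd.map (fun item => item.2.2.2))) z.2.2.2).getD 0)
        = (pvFK pd).idxOf (pvKf z) := by
    intro z hz
    rw [hfs, PySem.List.index?_eq_idxOf?]
    exact idxOf?_getD_of_mem _ _ (mem_pvFK.mpr ⟨z, hz, rfl⟩)
  simp only [if_neg Bool.false_ne_true, Nat.cast_lt, hix x hx, hix y hy, pvBef, pvDf, pvKf]
  rfl

-- ===== VERDICT (by name: the statement is the Claim_ definition above) =====
theorem data_sorter_spec : Claim_equal_data_sorter := by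
  intro pd L _
  unfold Spec_data_sorter
  rw [portA_eq, portB_eq]
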